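-- pv_equiv track=rewrite | github.com/workingenius/alc | python/analyze.py | calc_curline
-- ===== SOURCE A (Python) =====
-- def calc_curline(old_show_bm, new_show_bm, curline):
--     assert len(old_show_bm) == len(new_show_bm)
--     # compare old show_bm and new, and know which line to jump to
--     reaching = 0
--     offset = 0
--     for o, n in zip(old_show_bm, new_show_bm):
--         if o:
--             reaching += 1
--         if reaching >= curline:
--             curline += offset
--             break
--         if o and not n:
--             offset -= 1
--         elif not o and n:
--             offset += 1
--     return curline
-- ===== SOURCE B (Python) =====
-- def calc_curline(old_show_bm, new_show_bm, curline):
--     assert len(old_show_bm) == len(new_show_bm)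
--     # first pass: locate the smallest index whose running count of shown old
--     # bookmarks reaches curline
--     cut = None
--     cnt = 0
--     for i, o in enumerate(old_show_bm):
--         if o:
--             cnt += 1
--         if cnt >= curline:
--             cut = i
--             break
--     if cut is None:
--         return curline
--     # second pass: net bookmark-visibility delta strictly before the cut
--     delta = sum(bool(n) - bool(o)
--                 for o, n in zip(old_show_bm[:cut], new_show_bm[:cut]))
--     return curline + delta
-- ===== Notes on version B (the rewrite author's own statement) =====
-- stated objective: alternative
-- what changed: Replaces A's fused scan (accumulating the offset while searching for the break point) by two separate passes: first locate the cut index where the running count of shown old bookmarks reaches curline, then sum the net visibility delta over the prefix before it.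
import Mathlib
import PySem

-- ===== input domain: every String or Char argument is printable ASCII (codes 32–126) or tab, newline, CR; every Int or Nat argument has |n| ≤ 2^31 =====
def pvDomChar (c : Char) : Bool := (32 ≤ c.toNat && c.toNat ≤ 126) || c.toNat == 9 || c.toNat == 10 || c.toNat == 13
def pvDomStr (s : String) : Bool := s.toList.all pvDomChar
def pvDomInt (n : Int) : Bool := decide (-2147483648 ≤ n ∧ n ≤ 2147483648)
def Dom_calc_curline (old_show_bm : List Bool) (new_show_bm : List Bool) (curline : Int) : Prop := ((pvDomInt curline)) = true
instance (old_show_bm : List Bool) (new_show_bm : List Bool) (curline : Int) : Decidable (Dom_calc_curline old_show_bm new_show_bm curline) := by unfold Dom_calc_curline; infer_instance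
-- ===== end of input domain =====

-- B replaces A's fused accumulate-while-scanning loop by two passes (locate the
-- cut index, then sum the delta over the prefix); same cost, different decomposition.

-- ===== PORT A =====
-- A's for-loop over zip with state (reaching, offset) and an early break
def calcCurlineLoopA (zs : List (Bool × Bool)) (reaching : Int) (offset : Int) (curline : Int) : Int :=
  match zs with
  | [] => curline
  | (o, n) :: rest =>
    let reaching' := if o then reaching + 1 else reaching
    if reaching' ≥ curline then curline + offset
    else
      let offset' := if o && !n then offset - 1 else if !o && n then offset + 1 else offset
      calcCurlineLoopA rest reaching' offset' curline

def calc_curline (old_show_bm : List Bool) (new_show_bm : List Bool) (curline : Int) : Int :=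
  calcCurlineLoopA (old_show_bm.zip new_show_bm) 0 0 curline

-- ===== PORT B =====
-- first pass of Source B: smallest index where the running count of truthy old reaches curline
def calcCurlineFindCut (curline : Int) : List Bool → Int → Nat → Option Nat
  | [], _, _ => none
  | o :: rest, cnt, i =>
    let cnt' := if o then cnt + 1 else cnt
    if cnt' ≥ curline then some i else calcCurlineFindCut curline rest cnt' (i + 1)

-- second pass of Source B: sum of bool(n) - bool(o) over a prefix
def calcCurlineDelta (zs : List (Bool × Bool)) : Int :=
  zs.foldl (fun acc p => acc + ((if p.2 then (1 : Int) else 0) - (if p.1 then (1 : Int) else 0))) 0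

def calc_curline_alt (old_show_bm : List Bool) (new_show_bm : List Bool) (curline : Int) : Int :=
  match calcCurlineFindCut curline old_show_bm 0 0 with
  | none => curline
  | some cut =>
    curline + calcCurlineDelta ((old_show_bm.take cut).zip (new_show_bm.take cut))

-- ===== PRECONDITION & SPEC =====
-- A's assert raises AssertionError on lists of unequal length; exactly those inputs are excluded.
def Pre_calc_curline (old_show_bm : List Bool) (new_show_bm : List Bool) (curline : Int) : Prop :=
  old_show_bm.length = new_show_bm.length
instance (old_show_bm : List Bool) (new_show_bm : List Bool) (curline : Int) : Decidable (Pre_calc_curline old_show_bm new_show_bm curline) := by unfold Pre_calc_curline; infer_instance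

def pvWitness_calc_curline : List Bool × List Bool × Int := ([true, false, true], [false, true, true], 2)

def Spec_calc_curline (old_show_bm : List Bool) (new_show_bm : List Bool) (curline : Int) (out : Int) : Prop := out = calc_curline_alt old_show_bm new_show_bm curline
instance (old_show_bm : List Bool) (new_show_bm : List Bool) (curline : Int) (out : Int) : Decidable (Spec_calc_curline old_show_bm new_show_bm curline out) := by unfold Spec_calc_curline; infer_instance

-- ===== CLAIM (what is proved, stated in full; the proofs are below) =====
def Claim_equal_calc_curline : Prop := ∀ (old_show_bm : List Bool) (new_show_bm : List Bool) (curline : Int), Dom_calc_curline old_show_bm new_show_bm curline → Pre_calc_curline old_show_bm new_show_bm curline → Spec_calc_curline old_show_bm new_show_bm curline (calc_curline old_show_bm new_show_bm curline)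

-- ===== LEMMAS AND PROOFS =====

-- shifting the index argument of the first pass only shifts its result
theorem findCut_index_shift (curline : Int) (l : List Bool) (cnt : Int) (i : Nat) :
    calcCurlineFindCut curline l cnt (i + 1) = (calcCurlineFindCut curline l cnt i).map (· + 1) := by
  induction l generalizing cnt i with
  | nil => simp [calcCurlineFindCut]
  | cons o rest ih =>
    simp only [calcCurlineFindCut]
    by_cases h : (if o then cnt + 1 else cnt) ≥ curline
    · simp [h]
    · simp only [if_neg h]
      exact ih _ _

theorem delta_shift (zs : List (Bool × Bool)) (d : Int) :
    zs.foldl (fun acc p => acc + ((if p.2 then (1 : Int) else 0) - (if p.1 then (1 : Int) else 0))) d =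
      d + zs.foldl (fun acc p => acc + ((if p.2 then (1 : Int) else 0) - (if p.1 then (1 : Int) else 0))) 0 := by
  induction zs generalizing d with
  | nil => simp
  | cons p t ih =>
    simp only [List.foldl_cons]
    rw [ih, ih (0 + _)]
    ring

theorem delta_cons (o n : Bool) (zs : List (Bool × Bool)) :
    calcCurlineDelta ((o, n) :: zs) =
      ((if n then (1 : Int) else 0) - (if o then (1 : Int) else 0)) + calcCurlineDelta zs := by
  unfold calcCurlineDelta
  simp only [List.foldl_cons]
  rw [delta_shift]
  ring

-- the loop of A equals locate-then-aggregate, for any state (reaching, offset)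
theorem loopA_eq (old_show_bm new_show_bm : List Bool) (cnt offset curline : Int)
    (h : old_show_bm.length = new_show_bm.length) :
    calcCurlineLoopA (old_show_bm.zip new_show_bm) cnt offset curline =
      match calcCurlineFindCut curline old_show_bm cnt 0 with
      | none => curline
      | some cut =>
        curline + offset + calcCurlineDelta ((old_show_bm.take cut).zip (new_show_bm.take cut)) := by
  induction old_show_bm generalizing new_show_bm cnt offset with
  | nil =>
    simp [calcCurlineLoopA, calcCurlineFindCut]
  | cons o ot ih =>
    cases new_show_bm with
    | nil => simp at h
    | cons n nt =>
      simp only [List.length_cons, Nat.add_right_cancel_iff] at h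
      simp only [List.zip_cons_cons, calcCurlineLoopA, calcCurlineFindCut]
      by_cases hr : (if o then cnt + 1 else cnt) ≥ curline
      · simp [hr, calcCurlineDelta]
      · simp only [if_neg hr]
        rw [ih nt _ _ h, findCut_index_shift]
        cases hfc : calcCurlineFindCut curline ot (if o then cnt + 1 else cnt) 0 with
        | none => simp
        | some cut =>
          simp only [Option.map_some]
          rw [List.take_succ_cons, List.take_succ_cons, List.zip_cons_cons, delta_cons]
          cases o <;> cases n <;> simp <;> ring

-- ===== VERDICT (by name: the statement is the Claim_ definition above) =====
theorem calc_curline_spec : Claim_equal_calc_curline := by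
  intro old_show_bm new_show_bm curline _ hpre
  unfold Spec_calc_curline calc_curline calc_curline_alt
  rw [loopA_eq _ _ _ _ _ hpre]
  cases calcCurlineFindCut curline old_show_bm 0 0 <;> simp
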